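-- pv_equiv track=rewrite | github.com/xusun0623/qubit-reuse | qrmap_compiler.py | _generate_move_preferences
-- ===== SOURCE A (Python) =====
-- def _generate_move_preferences(moving_col, pivot, direction):
--     """生成移动偏好顺序"""
--     distance = abs(moving_col - pivot)
--     preferences = [0]  # 首先尝试不移动
--
--     for i in range(1, distance + 1):
--         if direction == "right":
--             preferences.extend([i, -i])
--         else:
--             preferences.extend([-i, i])
--
--     return preferences
-- ===== SOURCE B (Python) =====
-- def _generate_move_preferences(moving_col, pivot, direction):
--     """生成移动偏好顺序"""
--     distance = abs(moving_col - pivot)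
--     if direction == "right":
--         key = lambda v: 2 * abs(v) + (v < 0)
--     else:
--         key = lambda v: 2 * abs(v) + (v > 0)
--     return sorted(range(-distance, distance + 1), key=key)
-- ===== Notes on version B (the rewrite author's own statement) =====
-- stated objective: alternative
-- what changed: Replaces the incremental interleaving loop (extend [i,-i] per distance step) with a single key-sort of the full candidate range(-distance, distance+1), where the key 2*abs(v)+(sign-tiebreak) orders magnitudes ascending with the preferred sign first.
import Mathlib
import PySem

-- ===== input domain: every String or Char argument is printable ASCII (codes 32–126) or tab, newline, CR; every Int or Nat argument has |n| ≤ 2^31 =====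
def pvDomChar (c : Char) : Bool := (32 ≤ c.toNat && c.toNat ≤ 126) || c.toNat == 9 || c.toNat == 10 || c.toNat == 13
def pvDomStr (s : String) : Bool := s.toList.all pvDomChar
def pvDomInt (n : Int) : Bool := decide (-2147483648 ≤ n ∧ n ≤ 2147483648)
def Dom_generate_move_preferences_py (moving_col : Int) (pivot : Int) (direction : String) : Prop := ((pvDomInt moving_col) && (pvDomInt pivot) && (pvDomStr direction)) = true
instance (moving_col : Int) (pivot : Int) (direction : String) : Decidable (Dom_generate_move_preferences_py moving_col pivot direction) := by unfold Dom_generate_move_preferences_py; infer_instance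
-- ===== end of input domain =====

-- B replaces A's interleaving loop by a key-sort of the whole candidate range; alternative decomposition, same result.

-- ===== PORT A =====
def generate_move_preferences_py (moving_col : Int) (pivot : Int) (direction : String) : List Int :=
  let distance : Int := |moving_col - pivot|
  let preferences : List Int := [0]
  (PySem.List.pyRange 1 (distance + 1)).foldl
    (fun acc i => if direction == "right" then acc ++ [i, -i] else acc ++ [-i, i]) preferences

-- ===== PORT B =====
def generate_move_preferences_py_alt (moving_col : Int) (pivot : Int) (direction : String) : List Int :=
  let distance : Int := |moving_col - pivot|
  let key : Int → Int :=
    if direction == "right" then (fun v => 2 * |v| + (if v < 0 then 1 else 0))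
    else (fun v => 2 * |v| + (if 0 < v then 1 else 0))
  PySem.List.sorted (PySem.List.pyRange (-distance) (distance + 1)) key

-- ===== PRECONDITION & SPEC =====
def Spec_generate_move_preferences_py (moving_col : Int) (pivot : Int) (direction : String) (out : List Int) : Prop := out = generate_move_preferences_py_alt moving_col pivot direction
instance (moving_col : Int) (pivot : Int) (direction : String) (out : List Int) : Decidable (Spec_generate_move_preferences_py moving_col pivot direction out) := by unfold Spec_generate_move_preferences_py; infer_instance

-- ===== CLAIM (what is proved, stated in full; the proofs are below) =====
def Claim_equal_generate_move_preferences_py : Prop := ∀ (moving_col : Int) (pivot : Int) (direction : String), Dom_generate_move_preferences_py moving_col pivot direction → Spec_generate_move_preferences_py moving_col pivot direction (generate_move_preferences_py moving_col pivot direction)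

-- ===== LEMMAS AND PROOFS =====

-- the per-step block A appends, the sort key B uses, and A's whole output, all indexed by b = (direction == "right")
def pvG (b : Bool) (i : Int) : List Int := if b then [i, -i] else [-i, i]

def pvKey (b : Bool) (v : Int) : Int := 2 * |v| + (if (if b then v < 0 else 0 < v) then 1 else 0)

def pvL (b : Bool) (n : Nat) : List Int := 0 :: (PySem.List.pyRange 1 ((n : Int) + 1)).flatMap (pvG b)

theorem pvG_true (i : Int) : pvG true i = [i, -i] := rfl

theorem pvG_false (i : Int) : pvG false i = [-i, i] := rfl

theorem pvKey_pos (b : Bool) (v : Int) (hv : 0 < v) :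
    pvKey b v = 2 * v + (if b then 0 else 1) := by
  unfold pvKey
  rw [abs_of_pos hv]
  cases b <;> simp <;> omega

theorem pvKey_neg (b : Bool) (v : Int) (hv : v < 0) :
    pvKey b v = -2 * v + (if b then 1 else 0) := by
  unfold pvKey
  rw [abs_of_neg hv]
  cases b <;> simp <;> omega

theorem pvL_zero (b : Bool) : pvL b 0 = [0] := by
  simp [pvL, PySem.List.pyRange]

theorem pvL_succ (b : Bool) (n : Nat) : pvL b (n + 1) = pvL b n ++ pvG b ((n : Int) + 1) := by
  unfold pvL
  have h : ((n + 1 : Nat) : Int) + 1 = ((n : Int) + 1) + 1 := by push_cast; ring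
  rw [h, PySem.List.pyRange_one_succ_right (by omega)]
  simp

theorem pvPerm_step (R : List Int) (x y : Int) : (R ++ [y, x]).Perm (y :: (R ++ [x])) := by
  have h1 : R ++ [y, x] = (R ++ [y]) ++ [x] := by simp
  have h2 : y :: (R ++ [x]) = ([y] ++ R) ++ [x] := by simp
  rw [h1, h2]
  exact (List.perm_append_comm).append_right [x]

theorem pvPerm_step' (R : List Int) (x y : Int) : (R ++ [x, y]).Perm (y :: (R ++ [x])) := by
  refine (List.Perm.append_left R ?_).trans (pvPerm_step R x y)
  exact List.Perm.swap y x []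

theorem pvL_perm (b : Bool) (n : Nat) :
    (pvL b n).Perm (PySem.List.pyRange (-(n : Int)) ((n : Int) + 1)) := by
  induction n with
  | zero =>
    rw [pvL_zero]
    simp only [Nat.cast_zero, neg_zero, zero_add]
    decide
  | succ n ih =>
    rw [pvL_succ]
    have h1 : ((n + 1 : Nat) : Int) = (n : Int) + 1 := by push_cast; ring
    rw [h1]
    rw [PySem.List.pyRange_one_cons (by omega : -((n : Int) + 1) < (n : Int) + 1 + 1)]
    have h2 : -((n : Int) + 1) + 1 = -(n : Int) := by ring
    rw [h2, PySem.List.pyRange_one_succ_right (by omega : -(n : Int) ≤ (n : Int) + 1)]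
    cases b
    · rw [pvG_false]
      exact (ih.append_right _).trans (pvPerm_step _ ((n : Int) + 1) (-((n : Int) + 1)))
    · rw [pvG_true]
      exact (ih.append_right _).trans (pvPerm_step' _ ((n : Int) + 1) (-((n : Int) + 1)))

theorem pvL_key_bound (b : Bool) (n : Nat) :
    ∀ x ∈ pvL b n, pvKey b x ≤ 2 * (n : Int) + 1 := by
  intro x hx
  have hx' : x ∈ PySem.List.pyRange (-(n : Int)) ((n : Int) + 1) := (pvL_perm b n).mem_iff.mp hx
  rw [PySem.List.mem_pyRange_one] at hx'
  have habs : |x| ≤ (n : Int) := abs_le.mpr (by omega)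
  unfold pvKey
  split <;> omega

theorem pvKey_G_lower (b : Bool) (n : Nat) :
    ∀ c ∈ pvG b ((n : Int) + 1), 2 * ((n : Int) + 1) ≤ pvKey b c := by
  intro c hc
  have hmem : c = (n : Int) + 1 ∨ c = -((n : Int) + 1) := by
    cases b
    · rw [pvG_false] at hc; simp at hc; omega
    · rw [pvG_true] at hc; simp at hc <;> omega
  rcases hmem with rfl | rfl
  · rw [pvKey_pos b _ (by omega)]
    cases b <;> simp <;> omega
  · rw [pvKey_neg b _ (by omega)]
    cases b <;> simp <;> omega

theorem pvL_pairwise (b : Bool) (n : Nat) :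
    List.Pairwise (fun a c => pvKey b a < pvKey b c) (pvL b n) := by
  induction n with
  | zero => rw [pvL_zero]; simp
  | succ n ih =>
    rw [pvL_succ, List.pairwise_append]
    refine ⟨ih, ?_, ?_⟩
    · cases b
      · rw [pvG_false]
        refine List.pairwise_cons.mpr ⟨?_, List.pairwise_singleton _ _⟩
        intro c hc
        rw [List.mem_singleton] at hc
        subst hc
        rw [pvKey_neg _ _ (by omega), pvKey_pos _ _ (by omega)]
        simp
        omega
      · rw [pvG_true]
        refine List.pairwise_cons.mpr ⟨?_, List.pairwise_singleton _ _⟩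
        intro c hc
        rw [List.mem_singleton] at hc
        subst hc
        rw [pvKey_pos _ _ (by omega), pvKey_neg _ _ (by omega)]
        simp
        omega
    · intro a ha c hc
      have h1 := pvL_key_bound b n a ha
      have h2 := pvKey_G_lower b n c hc
      omega

theorem pvA_eq_pvL (moving_col pivot : Int) (direction : String) :
    generate_move_preferences_py moving_col pivot direction
      = pvL (direction == "right") (|moving_col - pivot|).toNat := by
  unfold generate_move_preferences_py pvL
  have hd : ((|moving_col - pivot|).toNat : Int) = |moving_col - pivot| :=
    Int.toNat_of_nonneg (abs_nonneg _)
  rw [hd]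
  have hf : (fun (acc : List Int) i => if direction == "right" then acc ++ [i, -i] else acc ++ [-i, i])
      = fun acc i => acc ++ pvG (direction == "right") i := by
    funext acc i
    by_cases h : direction == "right" <;> simp [h, pvG]
  rw [hf, PySem.List.foldl_append_eq_flatMap]
  rfl

theorem pvAlt_key (direction : String) :
    (if direction == "right" then (fun v : Int => 2 * |v| + (if v < 0 then 1 else 0))
     else (fun v : Int => 2 * |v| + (if 0 < v then 1 else 0))) = pvKey (direction == "right") := by
  by_cases h : direction == "right" <;> funext v <;> simp [h, pvKey]

-- ===== VERDICT (by name: the statement is the Claim_ definition above) =====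
theorem generate_move_preferences_py_spec : Claim_equal_generate_move_preferences_py := by
  intro moving_col pivot direction _
  unfold Spec_generate_move_preferences_py
  unfold generate_move_preferences_py_alt
  rw [pvAlt_key, pvA_eq_pvL]
  have hd : (((|moving_col - pivot|).toNat : Nat) : Int) = |moving_col - pivot| :=
    Int.toNat_of_nonneg (abs_nonneg _)
  rw [← hd]
  exact (PySem.List.sorted_eq_of_perm_of_pairwise_lt _ _ (pvKey (direction == "right"))
    (pvL_perm _ _) (pvL_pairwise _ _)).symm
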